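-- pv_equiv track=rewrite | github.com/Redieet/first | 2533-bitwise-xor-of-all-pairings/bitwise-xor-of-all-pairings.py | xorAllNums
-- ===== SOURCE A (Python) =====
-- def xorAllNums(nums1: list[int], nums2: list[int]) -> int:
--     """
--     Calculate the bitwise XOR of all pairings between elements of nums1 and nums2.
--
--     Args:
--     nums1: List[int] - First list of non-negative integers.
--     nums2: List[int] - Second list of non-negative integers.
--
--     Returns:
--     int - The XOR of all pairings between nums1 and nums2.
--     """
--     # Initialize XOR values for nums1 and nums2
--     xor_nums1 = 0
--     xor_nums2 = 0
--
--     # Calculate the XOR of all elements in nums1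
--     for num in nums1:
--         xor_nums1 ^= num
--
--     # Calculate the XOR of all elements in nums2
--     for num in nums2:
--         xor_nums2 ^= num
--
--     # Determine the size of nums1 and nums2
--     len1, len2 = len(nums1), len(nums2)
--
--     # The total XOR will depend on the parity (odd/even) of the lengths of nums1 and nums2
--     result = 0
--
--     # If nums2 contributes odd times to the result, include xor_nums1
--     if len2 % 2 == 1:
--         result ^= xor_nums1
--
--     # If nums1 contributes odd times to the result, include xor_nums2
--     if len1 % 2 == 1:
--         result ^= xor_nums2
--
--     return result
-- ===== SOURCE B (Python) =====
-- def xorAllNums(nums1: list[int], nums2: list[int]) -> int: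
--     result = 0
--     for a in nums1:
--         for b in nums2:
--             result ^= a ^ b
--     return result
-- ===== Notes on version B (the rewrite author's own statement) =====
-- stated objective: alternative
-- what changed: B computes the XOR over all actual cross-pairings with a direct nested loop (result ^= a ^ b), instead of A's parity-based closed form using per-list XORs and length parities.
import Mathlib
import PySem

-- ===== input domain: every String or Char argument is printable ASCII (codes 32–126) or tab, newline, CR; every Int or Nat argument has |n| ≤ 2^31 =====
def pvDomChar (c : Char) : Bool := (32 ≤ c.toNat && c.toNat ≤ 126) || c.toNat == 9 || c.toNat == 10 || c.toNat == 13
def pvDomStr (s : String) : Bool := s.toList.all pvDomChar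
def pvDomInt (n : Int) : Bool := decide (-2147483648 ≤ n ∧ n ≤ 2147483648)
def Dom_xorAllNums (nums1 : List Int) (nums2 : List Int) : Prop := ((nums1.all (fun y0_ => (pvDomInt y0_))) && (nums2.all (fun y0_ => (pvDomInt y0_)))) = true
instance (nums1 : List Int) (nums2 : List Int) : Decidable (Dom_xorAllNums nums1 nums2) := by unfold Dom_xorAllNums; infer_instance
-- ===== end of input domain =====

-- B replaces A's parity closed form by the direct nested-loop XOR over all cross-pairings (alternative decomposition, not faster).


-- ===== PORT A =====
-- per-list XORs, then include each according to the parity of the other list's length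
def xorAllNums (nums1 : List Int) (nums2 : List Int) : Int :=
  let xor_nums1 := nums1.foldl (fun acc num => PySem.Int.bxor acc num) 0
  let xor_nums2 := nums2.foldl (fun acc num => PySem.Int.bxor acc num) 0
  let len1 := nums1.length
  let len2 := nums2.length
  let result : Int := 0
  let result := if len2 % 2 = 1 then PySem.Int.bxor result xor_nums1 else result
  let result := if len1 % 2 = 1 then PySem.Int.bxor result xor_nums2 else result
  result

-- ===== PORT B =====
-- direct nested loop: result ^= a ^ b for every pairing
def xorAllNums_alt (nums1 : List Int) (nums2 : List Int) : Int :=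
  nums1.foldl
    (fun result a =>
      nums2.foldl (fun result b => PySem.Int.bxor result (PySem.Int.bxor a b)) result)
    0

-- ===== PRECONDITION & SPEC =====
def Spec_xorAllNums (nums1 : List Int) (nums2 : List Int) (out : Int) : Prop := out = xorAllNums_alt nums1 nums2
instance (nums1 : List Int) (nums2 : List Int) (out : Int) : Decidable (Spec_xorAllNums nums1 nums2 out) := by unfold Spec_xorAllNums; infer_instance

-- ===== CLAIM (what is proved, stated in full; the proofs are below) =====
def Claim_equal_xorAllNums : Prop := ∀ (nums1 : List Int) (nums2 : List Int), Dom_xorAllNums nums1 nums2 → Spec_xorAllNums nums1 nums2 (xorAllNums nums1 nums2)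

-- ===== LEMMAS AND PROOFS =====

theorem bxor_eq_xor (a b : Int) : PySem.Int.bxor a b = Int.xor a b := by
  rcases a with m | m <;> rcases b with n | n <;>
    simp [PySem.Int.bxor, Int.xor, Int.negSucc_eq] <;> omega

theorem xor_zero_right (a : Int) : Int.xor a 0 = a := by
  rcases a with m | m <;> simp [Int.xor]

theorem xor_zero_left (a : Int) : Int.xor 0 a = a := by
  rcases a with m | m <;> simp [Int.xor]

theorem xor_self' (a : Int) : Int.xor a a = 0 := by
  rcases a with m | m <;> simp [Int.xor]

theorem xor_comm' (a b : Int) : Int.xor a b = Int.xor b a := by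
  rcases a with m | m <;> rcases b with n | n <;> simp [Int.xor, Nat.xor_comm]

theorem xor_assoc' (a b c : Int) : Int.xor (Int.xor a b) c = Int.xor a (Int.xor b c) := by
  rcases a with m | m <;> rcases b with n | n <;> rcases c with k | k <;>
    simp [Int.xor, Nat.xor_assoc]

theorem xor_cancel_left (a b : Int) : Int.xor a (Int.xor a b) = b := by
  rw [← xor_assoc', xor_self', xor_zero_left]

theorem xor_left_comm' (a b c : Int) : Int.xor a (Int.xor b c) = Int.xor b (Int.xor a c) := by
  rw [← xor_assoc', xor_comm' a b, xor_assoc']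

-- pulling the accumulator out of a plain xor fold
theorem foldl_xor_acc (l : List Int) (r : Int) :
    l.foldl Int.xor r = Int.xor r (l.foldl Int.xor 0) := by
  induction l generalizing r with
  | nil => simp [xor_zero_right]
  | cons a t ih =>
    simp only [List.foldl_cons]
    rw [ih (Int.xor r a), ih (Int.xor 0 a), xor_zero_left, xor_assoc']

-- inner loop of B: each b contributes (a xor b); a is contributed once per element of l
theorem inner_loop (a : Int) (l : List Int) (r : Int) :
    l.foldl (fun r b => Int.xor r (Int.xor a b)) r =
      Int.xor r (Int.xor (if l.length % 2 = 1 then a else 0) (l.foldl Int.xor 0)) := by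
  induction l generalizing r with
  | nil => simp [xor_zero_right]
  | cons b t ih =>
    simp only [List.foldl_cons, List.length_cons]
    rw [ih, xor_zero_left, foldl_xor_acc t b]
    rcases Nat.mod_two_eq_zero_or_one t.length with h | h
    · have h' : (t.length + 1) % 2 = 1 := by omega
      simp [h, h', xor_assoc', xor_left_comm', xor_comm', xor_self', xor_cancel_left, xor_zero_left,
        xor_zero_right]
    · have h' : (t.length + 1) % 2 = 0 := by omega
      simp [h, h', xor_assoc', xor_left_comm', xor_comm', xor_self', xor_cancel_left, xor_zero_left,
        xor_zero_right]

-- outer loop of B when nums2's length is odd: step is r ↦ r ^ (a ^ X)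
theorem outer_odd (X : Int) (l : List Int) (r : Int) :
    l.foldl (fun r a => Int.xor r (Int.xor a X)) r =
      Int.xor r (Int.xor (l.foldl Int.xor 0) (if l.length % 2 = 1 then X else 0)) := by
  induction l generalizing r with
  | nil => simp [xor_zero_right]
  | cons a t ih =>
    simp only [List.foldl_cons, List.length_cons]
    rw [ih, xor_zero_left, foldl_xor_acc t a]
    rcases Nat.mod_two_eq_zero_or_one t.length with h | h
    · have h' : (t.length + 1) % 2 = 1 := by omega
      simp [h, h', xor_assoc', xor_left_comm', xor_comm', xor_self', xor_cancel_left, xor_zero_left,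
        xor_zero_right]
    · have h' : (t.length + 1) % 2 = 0 := by omega
      simp [h, h', xor_assoc', xor_left_comm', xor_comm', xor_self', xor_cancel_left, xor_zero_left,
        xor_zero_right]

-- outer loop of B when nums2's length is even: step is r ↦ r ^ X
theorem outer_even (X : Int) (l : List Int) (r : Int) :
    l.foldl (fun r _ => Int.xor r X) r =
      Int.xor r (if l.length % 2 = 1 then X else 0) := by
  induction l generalizing r with
  | nil => simp [xor_zero_right]
  | cons a t ih =>
    simp only [List.foldl_cons, List.length_cons]
    rw [ih]
    rcases Nat.mod_two_eq_zero_or_one t.length with h | h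
    · have h' : (t.length + 1) % 2 = 1 := by omega
      simp [h, h', xor_assoc', xor_left_comm', xor_comm', xor_self', xor_cancel_left, xor_zero_left,
        xor_zero_right]
    · have h' : (t.length + 1) % 2 = 0 := by omega
      simp [h, h', xor_assoc', xor_left_comm', xor_comm', xor_self', xor_cancel_left, xor_zero_left,
        xor_zero_right]

-- ===== VERDICT (by name: the statement is the Claim_ definition above) =====
theorem xorAllNums_spec : Claim_equal_xorAllNums := by
  intro nums1 nums2 _
  unfold Spec_xorAllNums xorAllNums xorAllNums_alt
  simp only [bxor_eq_xor]
  have hinner :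
      (fun (result a : Int) =>
          nums2.foldl (fun result b => Int.xor result (Int.xor a b)) result) =
        fun result a =>
          Int.xor result (Int.xor (if nums2.length % 2 = 1 then a else 0)
            (nums2.foldl Int.xor 0)) := by
    funext r a
    exact inner_loop a nums2 r
  rw [hinner]
  rcases Nat.mod_two_eq_zero_or_one nums2.length with h2 | h2 <;>
    simp only [h2] <;>
    rcases Nat.mod_two_eq_zero_or_one nums1.length with h1 | h1
  · -- both even
    simp only [if_neg (by omega : ¬ (0:Nat) = 1)]
    rw [show (fun (r a : Int) => Int.xor r (Int.xor 0 (nums2.foldl Int.xor 0))) =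
        fun (r : Int) (_ : Int) => Int.xor r (Int.xor 0 (nums2.foldl Int.xor 0)) from rfl,
      outer_even]
    simp [h1, h2, xor_zero_left]
  · -- len2 even, len1 odd
    simp only [if_neg (by omega : ¬ (0:Nat) = 1)]
    rw [show (fun (r a : Int) => Int.xor r (Int.xor 0 (nums2.foldl Int.xor 0))) =
        fun (r : Int) (_ : Int) => Int.xor r (Int.xor 0 (nums2.foldl Int.xor 0)) from rfl,
      outer_even]
    simp [h1, h2, xor_zero_left]
  · -- len2 odd, len1 even
    simp only [if_true]
    rw [show (fun (r a : Int) => Int.xor r (Int.xor a (nums2.foldl Int.xor 0))) =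
        fun (r a : Int) => Int.xor r (Int.xor a (nums2.foldl Int.xor 0)) from rfl,
      outer_odd]
    simp [h1, h2, xor_zero_left, xor_zero_right]
  · -- both odd
    simp only [if_true]
    rw [outer_odd]
    simp [h1, h2, xor_zero_left, xor_zero_right]
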